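-- pv_equiv track=rewrite | github.com/eunhee-dev/problem-solving | 0x0d. simulation/20061번. 모노미노도미노 2/solve.py | solve
-- ===== SOURCE A (Python) =====
-- BLOCK_OFFSETS = {
--     1: (0, 0),
--     2: (0, 1),
--     3: (1, 0)
-- }
--
-- def delete_row(board: list[list[int]], row: int) -> None:
--     del board[row]
--     board.insert(0, [0, 0, 0, 0])
--
-- def add_block(board: list[list[int]], t: int, col: int) -> None:
--     dr, dc = BLOCK_OFFSETS[t]
--     row = 0
--     while row + dr < 5 and board[row + 1][col] == 0 and board[row + 1 + dr][col + dc] == 0: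
--         row += 1
--     board[row][col], board[row + dr][col + dc] = 1, 1
--
-- def check_filled(board: list[list[int]]) -> int:
--     for r in range(5, 1, -1):
--         if all(board[r][c] for c in range(4)):
--             board[r] = [0, 0, 0, 0]
--             return r
--     return 0
--
-- def play(board: list[list[int]], t: int, col: int) -> int:
--     score = 0
--
--     # 블록 추가
--     add_block(board, t, col)
--
--     # 완성된 행 체크하여 제거
--     while row := check_filled(board):
--         score += 1
--         delete_row(board, row)
--
--     # 연한 칸에 블록이 있는 경우 처리
--     for _ in range(2):
--         if any(board[1][c] for c in range(4)):
--             delete_row(board, 5)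
--
--     return score
--
-- def solve(blocks: list[tuple[int, int, int]]) -> tuple[int, int]:
--     score = 0
--     green = [[0] * 4 for _ in range(6)]
--     blue = [[0] * 4 for _ in range(6)]
--
--     for t, x, y in blocks:
--         if t == 1:
--             score += play(green, 1, y)
--             score += play(blue, 1, x)
--
--         elif t == 2:
--             score += play(green, 2, y)
--             score += play(blue, 3, x)
--
--         elif t == 3:
--             score += play(green, 3, y)
--             score += play(blue, 2, x)
--
--     return score, sum(v != 0 for row in green + blue for v in row)
-- ===== SOURCE B (Python) =====
-- # Boards as six 4-bit row masks; the drop is a closed-form min over first-occupied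
-- # scans, all full rows clear in one batch, and the light-zone push-outs are computed
-- # arithmetically instead of A's cell lists, drop while-loop and clear-rescan loop.
--
-- def _top(board, col, start):
--     # first occupied row index >= start in this column, 6 if the column is clear
--     return next((r for r in range(start, 6) if board[r] >> col & 1), 6)
--
-- def _play(board, dr, dc, col):
--     # closed-form resting row: bounded by the floor and by the first occupied
--     # cell that each half of the block would run into
--     row = min(5 - dr,
--               _top(board, col, 1) - 1,
--               _top(board, col + dc, 1 + dr) - 1 - dr)
--     board[row] |= 1 << col
--     board[row + dr] |= 1 << (col + dc)
--
--     # clear every full visible row (2..5) in one batch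
--     kept = [m for r, m in enumerate(board) if r < 2 or m != 0b1111]
--     score = 6 - len(kept)
--     board[:] = [0] * score + kept
--
--     # light-zone push-outs: once if row 1 holds anything, once more if the row
--     # shifted into its place (old row 0) does too
--     k = (1 if board[1] else 0) + (1 if board[1] and board[0] else 0)
--     board[:] = [0] * k + board[:6 - k]
--     return score
--
--
-- def solve(blocks: list[tuple[int, int, int]]) -> tuple[int, int]:
--     score = 0
--     green = [0] * 6
--     blue = [0] * 6
--     for t, x, y in blocks:
--         if t == 1:
--             score += _play(green, 0, 0, y)
--             score += _play(blue, 0, 0, x)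
--         elif t == 2:
--             score += _play(green, 0, 1, y)
--             score += _play(blue, 1, 0, x)
--         elif t == 3:
--             score += _play(green, 1, 0, y)
--             score += _play(blue, 0, 1, x)
--     return score, sum(m.bit_count() for m in green + blue)
-- ===== Notes on version B (the rewrite author's own statement) =====
-- stated objective: alternative
-- what changed: Boards become six 4-bit row masks and every stage of a turn is recomputed rather than simulated: the resting row is a closed-form min over first-occupied-cell scans instead of A's joint drop while-loop, all full rows clear in one batch filter instead of A's clear-one-row-then-rescan loop, and the light-zone push-outs come from one arithmetic count instead of two conditional delete passes.
-- outside the precondition, e.g. on solve([(1, 0, -1)]): A returns (0, 2), B raises ValueError; on solve([(2, -1, 0)]): A returns (0, 4), B raises ValueError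
import Mathlib
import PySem

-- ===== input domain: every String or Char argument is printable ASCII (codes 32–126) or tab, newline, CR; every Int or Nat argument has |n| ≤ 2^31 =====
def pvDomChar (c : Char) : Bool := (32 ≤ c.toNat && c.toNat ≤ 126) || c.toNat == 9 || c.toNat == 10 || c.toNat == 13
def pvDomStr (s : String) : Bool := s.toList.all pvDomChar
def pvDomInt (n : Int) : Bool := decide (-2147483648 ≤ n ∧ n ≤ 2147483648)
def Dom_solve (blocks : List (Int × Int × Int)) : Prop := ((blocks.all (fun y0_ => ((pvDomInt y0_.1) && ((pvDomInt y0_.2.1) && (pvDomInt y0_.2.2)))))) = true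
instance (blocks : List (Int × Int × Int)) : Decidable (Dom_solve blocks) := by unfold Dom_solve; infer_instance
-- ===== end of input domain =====

-- B replaces A's cell-list simulation by six 4-bit row masks computed stage-wise in closed
-- form: the resting row is a min over first-occupied scans (no joint drop while-loop), all
-- full rows clear in one batch filter (no clear-then-rescan loop), and the light-zone
-- push-outs come from one arithmetic count; objective: alternative, equal return value.

-- ===== PORT A =====
-- BLOCK_OFFSETS[t]  (dict lookup; none = KeyError)
def blockOffsetsA (t : Int) : Option (Int × Int) :=
  if t = 1 then some (0, 0) else if t = 2 then some (0, 1)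
  else if t = 3 then some (1, 0) else none

-- board[r][c]  (none = IndexError)
def cellGetA (board : List (List Int)) (r c : Int) : Option Int :=
  (PySem.List.pyGet? board r).bind fun row => PySem.List.pyGet? row c

-- board[r][c] = v
def cellSetA (board : List (List Int)) (r c : Int) (v : Int) : Option (List (List Int)) :=
  (PySem.List.pyGet? board r).bind fun row =>
  (PySem.List.pySet? row c v).bind fun row' =>
  PySem.List.pySet? board r row'

-- del board[row]; board.insert(0, [0,0,0,0])
def deleteRowA (board : List (List Int)) (row : Int) : Option (List (List Int)) :=
  (PySem.List.pop? board row).map fun p => [0, 0, 0, 0] :: p.2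

-- the while loop of add_block; fuel 6 can never run out (row grows, row + dr < 5 bounds it)
def addLoopA (board : List (List Int)) (dr dc col : Int) : Int → Nat → Option Int
  | row, 0 => some row
  | row, fuel + 1 =>
    if row + dr < 5 then
      (cellGetA board (row + 1) col).bind fun v1 =>
      if v1 = 0 then
        (cellGetA board (row + 1 + dr) (col + dc)).bind fun v2 =>
        if v2 = 0 then addLoopA board dr dc col (row + 1) fuel else some row
      else some row
    else some row

def addBlockA (board : List (List Int)) (t col : Int) : Option (List (List Int)) :=
  (blockOffsetsA t).bind fun drdc =>
  (addLoopA board drdc.1 drdc.2 col 0 6).bind fun row =>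
  (cellSetA board row col 1).bind fun b1 =>
  cellSetA b1 (row + drdc.1) (col + drdc.2) 1

-- all(board[r][c] for c in range(4))  (short-circuits like the generator)
def rowAllA (row : List Int) : Option Bool :=
  (PySem.List.pyGet? row 0).bind fun a => if a = 0 then some false else
  (PySem.List.pyGet? row 1).bind fun b => if b = 0 then some false else
  (PySem.List.pyGet? row 2).bind fun c => if c = 0 then some false else
  (PySem.List.pyGet? row 3).bind fun d => if d = 0 then some false else some true

-- any(board[1][c] for c in range(4))
def rowAnyA (row : List Int) : Option Bool :=
  (PySem.List.pyGet? row 0).bind fun a => if a ≠ 0 then some true else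
  (PySem.List.pyGet? row 1).bind fun b => if b ≠ 0 then some true else
  (PySem.List.pyGet? row 2).bind fun c => if c ≠ 0 then some true else
  (PySem.List.pyGet? row 3).bind fun d => if d ≠ 0 then some true else some false

-- check_filled: scan r = 5,4,3,2; clear the first full row and return r, else 0
def checkFilledGoA (board : List (List Int)) : List Int → Option (List (List Int) × Int)
  | [] => some (board, 0)
  | r :: rs =>
    (PySem.List.pyGet? board r).bind fun row =>
    (rowAllA row).bind fun full =>
    if full then (PySem.List.pySet? board r [0, 0, 0, 0]).map fun b => (b, r)
    else checkFilledGoA board rs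

def checkFilledA (board : List (List Int)) : Option (List (List Int) × Int) :=
  checkFilledGoA board (PySem.List.pyRange 5 1 (-1))

-- while row := check_filled(board): score += 1; delete_row(board, row)
-- fuel 8 can never run out: each clear removes a full row and inserts an empty one
def clearLoopA (board : List (List Int)) (score : Int) : Nat → Option (List (List Int) × Int)
  | 0 => some (board, score)
  | fuel + 1 =>
    (checkFilledA board).bind fun p =>
    if p.2 ≠ 0 then (deleteRowA p.1 p.2).bind fun b' => clearLoopA b' (score + 1) fuel
    else some (p.1, score)

-- if any(board[1][c] for c in range(4)): delete_row(board, 5)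
def lightStepA (board : List (List Int)) : Option (List (List Int)) :=
  (PySem.List.pyGet? board 1).bind fun row =>
  (rowAnyA row).bind fun anyv =>
  if anyv then deleteRowA board 5 else some board

def playA (board : List (List Int)) (t col : Int) : Option (List (List Int) × Int) :=
  (addBlockA board t col).bind fun b =>
  (clearLoopA b 0 8).bind fun p =>
  (lightStepA p.1).bind fun b3 =>
  (lightStepA b3).map fun b4 => (b4, p.2)

def stepA (st : Option (List (List Int) × List (List Int) × Int)) (blk : Int × Int × Int) :
    Option (List (List Int) × List (List Int) × Int) :=
  st.bind fun gbs =>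
  if blk.1 = 1 then
    (playA gbs.1 1 blk.2.2).bind fun g' => (playA gbs.2.1 1 blk.2.1).map fun b' =>
      (g'.1, b'.1, gbs.2.2 + g'.2 + b'.2)
  else if blk.1 = 2 then
    (playA gbs.1 2 blk.2.2).bind fun g' => (playA gbs.2.1 3 blk.2.1).map fun b' =>
      (g'.1, b'.1, gbs.2.2 + g'.2 + b'.2)
  else if blk.1 = 3 then
    (playA gbs.1 3 blk.2.2).bind fun g' => (playA gbs.2.1 2 blk.2.1).map fun b' =>
      (g'.1, b'.1, gbs.2.2 + g'.2 + b'.2)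
  else some gbs

-- sum(v != 0 for row in green + blue for v in row)
def countA (rows : List (List Int)) : Int :=
  ((rows.flatMap fun row => row).map fun v => if v ≠ 0 then (1 : Int) else 0).sum

def initBoardA : List (List Int) :=
  [[0,0,0,0],[0,0,0,0],[0,0,0,0],[0,0,0,0],[0,0,0,0],[0,0,0,0]]

def solve (blocks : List (Int × Int × Int)) : Int × Int :=
  match blocks.foldl stepA (some (initBoardA, initBoardA, 0)) with
  | some gbs => (gbs.2.2, countA (gbs.1 ++ gbs.2.1))
  | none => (0, 0)   -- unreachable under Pre_solve: the Python raises on these inputs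

-- ===== PORT B =====
-- board = six 4-bit masks (List Nat); Pre_solve keeps all columns in 0..3, so the Nat
-- shifts below are exact.

-- _top: first occupied row index ≥ start in this column (scan of range(start, 6)); 6 if none
def topB (board : List Nat) (col : Nat) : List Int → Nat
  | [] => 6
  | r :: rs => if (board.getD r.toNat 0) >>> col &&& 1 ≠ 0 then r.toNat else topB board col rs

-- closed-form resting row; every subtrahend is bounded by its minuend (topB ≥ its start),
-- so Nat subtraction computes exactly the Python ints
def dropRowB (board : List Nat) (dr dc col : Nat) : Nat :=
  min (5 - dr)
    (min (topB board col (PySem.List.pyRange 1 6 1) - 1)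
         (topB board (col + dc) (PySem.List.pyRange ((1 + dr : Nat) : Int) 6 1) - 1 - dr))

-- kept = [m for r, m in enumerate(board) if r < 2 or m != 0b1111]; score = 6 - len(kept)
def clearB (board : List Nat) : List Nat × Int :=
  let kept := ((PySem.List.enumerate board).filter fun p => p.1 < 2 ∨ p.2 ≠ 15).map Prod.snd
  (List.replicate (6 - kept.length) 0 ++ kept, (6 : Int) - kept.length)

-- k = (1 if board[1] else 0) + (1 if board[1] and board[0] else 0)
def lightB (board : List Nat) : List Nat :=
  let k := (if board.getD 1 0 ≠ 0 then 1 else 0) +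
           (if board.getD 1 0 ≠ 0 ∧ board.getD 0 0 ≠ 0 then 1 else 0)
  List.replicate k 0 ++ board.take (6 - k)

def playB (board : List Nat) (dr dc col : Nat) : List Nat × Int :=
  let row := dropRowB board dr dc col
  let b1 := board.set row (board.getD row 0 ||| (1 <<< col))
  let b2 := b1.set (row + dr) (b1.getD (row + dr) 0 ||| (1 <<< (col + dc)))
  let p := clearB b2
  (lightB p.1, p.2)

-- Python raises on a negative shift count; Pre_solve excludes negative columns, so .toNat is exact here
def stepB (st : List Nat × List Nat × Int) (blk : Int × Int × Int) : List Nat × List Nat × Int :=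
  if blk.1 = 1 then
    let g' := playB st.1 0 0 blk.2.2.toNat
    let b' := playB st.2.1 0 0 blk.2.1.toNat
    (g'.1, b'.1, st.2.2 + g'.2 + b'.2)
  else if blk.1 = 2 then
    let g' := playB st.1 0 1 blk.2.2.toNat
    let b' := playB st.2.1 1 0 blk.2.1.toNat
    (g'.1, b'.1, st.2.2 + g'.2 + b'.2)
  else if blk.1 = 3 then
    let g' := playB st.1 1 0 blk.2.2.toNat
    let b' := playB st.2.1 0 1 blk.2.1.toNat
    (g'.1, b'.1, st.2.2 + g'.2 + b'.2)
  else st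

-- sum(m.bit_count() for m in green + blue)
def countB (ms : List Nat) : Int :=
  (ms.map fun m => (PySem.Int.bitCount (m : Int) : Int)).sum

def solve_alt (blocks : List (Int × Int × Int)) : Int × Int :=
  let st := blocks.foldl stepB ([0,0,0,0,0,0], [0,0,0,0,0,0], 0)
  (st.2.2, countB (st.1 ++ st.2.1))

-- ===== PRECONDITION & SPEC =====
-- Pre_solve keeps every block's columns inside the 4-wide boards (as BOJ 20061 guarantees):
-- a column ≥ 4 (or ≥ 3 for a horizontal domino) makes A raise IndexError, and a negative
-- column makes A place the block on the opposite side of the board by Python's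
-- negative-index wraparound while B raises ValueError on the negative shift count.
def Pre_solve (blocks : List (Int × Int × Int)) : Prop :=
  ∀ blk ∈ blocks,
    (blk.1 = 1 → 0 ≤ blk.2.1 ∧ blk.2.1 ≤ 3 ∧ 0 ≤ blk.2.2 ∧ blk.2.2 ≤ 3) ∧
    (blk.1 = 2 → 0 ≤ blk.2.1 ∧ blk.2.1 ≤ 3 ∧ 0 ≤ blk.2.2 ∧ blk.2.2 ≤ 2) ∧
    (blk.1 = 3 → 0 ≤ blk.2.1 ∧ blk.2.1 ≤ 2 ∧ 0 ≤ blk.2.2 ∧ blk.2.2 ≤ 3)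
instance (blocks : List (Int × Int × Int)) : Decidable (Pre_solve blocks) := by
  unfold Pre_solve; infer_instance

def pvWitness_solve : (List (Int × Int × Int)) := [(1, 0, 0), (2, 1, 2), (3, 0, 3), (1, 0, 0)]

def Spec_solve (blocks : List (Int × Int × Int)) (out : Int × Int) : Prop := out = solve_alt blocks
instance (blocks : List (Int × Int × Int)) (out : Int × Int) : Decidable (Spec_solve blocks out) := by
  unfold Spec_solve; infer_instance

-- ===== CLAIM (what is proved, stated in full; the proofs are below) =====
def Claim_equal_solve : Prop := ∀ (blocks : List (Int × Int × Int)),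
  Dom_solve blocks → Pre_solve blocks → Spec_solve blocks (solve blocks)

-- ===== LEMMAS AND PROOFS =====

-- a valid row: exactly four cells, each 0 or 1
def VRow (row : List Int) : Prop :=
  ∃ a b c d, (a = 0 ∨ a = 1) ∧ (b = 0 ∨ b = 1) ∧ (c = 0 ∨ c = 1) ∧ (d = 0 ∨ d = 1) ∧
    row = [a, b, c, d]

-- a valid board: six valid rows
def VB (b : List (List Int)) : Prop :=
  ∃ r0 r1 r2 r3 r4 r5, VRow r0 ∧ VRow r1 ∧ VRow r2 ∧ VRow r3 ∧ VRow r4 ∧ VRow r5 ∧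
    b = [r0, r1, r2, r3, r4, r5]

-- the bitmask B keeps for a row A keeps as a 4-list
def rowMask (row : List Int) : Nat :=
  (if row.getD 0 0 = 0 then 0 else 1) + (if row.getD 1 0 = 0 then 0 else 2) +
  (if row.getD 2 0 = 0 then 0 else 4) + (if row.getD 3 0 = 0 then 0 else 8)

-- proof-side mirror of A's clear loop at the mask level (the stepping stone between
-- A's one-row-per-pass loop and B's batch filter)
def findFullB (board : List Nat) : List Int → Option Int
  | [] => none
  | r :: rs => if board.getD r.toNat 0 = 15 then some r else findFullB board rs

def clearSeq (board : List Nat) (score : Int) : Nat → List Nat × Int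
  | 0 => (board, score)
  | fuel + 1 =>
    match findFullB board (PySem.List.pyRange 5 1 (-1)) with
    | some r => clearSeq ((0 : Nat) :: board.eraseIdx r.toNat) (score + 1) fuel
    | none => (board, score)

-- proof-side mirror of one light-zone pass at the mask level
def lightMask (board : List Nat) : List Nat :=
  if board.getD 1 0 ≠ 0 then (0 : Nat) :: board.eraseIdx 5 else board

-- row-level bridge: Python list cell reads/writes against the 4-bit row mask

theorem rows_len (row : List Int) (h : VRow row) : row.length = 4 := by
  obtain ⟨a, b, c, d, -, -, -, -, rfl⟩ := h; rfl

theorem row_get (row : List Int) (h : VRow row) (k : Nat) (hk : k ≤ 3) :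
    PySem.List.pyGet? row (k : Int) = some (row.getD k 0) := by
  obtain ⟨a, b, c, d, -, -, -, -, rfl⟩ := h
  interval_cases k <;> simp

theorem row_bit (row : List Int) (h : VRow row) (k : Nat) (hk : k ≤ 3) :
    (row.getD k 0 = 0) ↔ (rowMask row >>> k &&& 1 = 0) := by
  obtain ⟨a, b, c, d, ha, hb, hc, hd, rfl⟩ := h
  interval_cases k <;> rcases ha with rfl | rfl <;> rcases hb with rfl | rfl <;>
    rcases hc with rfl | rfl <;> rcases hd with rfl | rfl <;> decide

theorem row_set_eq (row : List Int) (h : VRow row) (k : Nat) (hk : k ≤ 3) :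
    PySem.List.pySet? row (k : Int) 1 = some (row.set k 1) := by
  exact PySem.List.pySet?_natCast row k 1 (by rw [rows_len row h]; omega)

theorem row_set_V (row : List Int) (h : VRow row) (k : Nat) : VRow (row.set k 1) := by
  obtain ⟨a, b, c, d, ha, hb, hc, hd, rfl⟩ := h
  match k with
  | 0 => exact ⟨1, b, c, d, Or.inr rfl, hb, hc, hd, rfl⟩
  | 1 => exact ⟨a, 1, c, d, ha, Or.inr rfl, hc, hd, rfl⟩
  | 2 => exact ⟨a, b, 1, d, ha, hb, Or.inr rfl, hd, rfl⟩
  | 3 => exact ⟨a, b, c, 1, ha, hb, hc, Or.inr rfl, rfl⟩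
  | n + 4 => exact ⟨a, b, c, d, ha, hb, hc, hd, by simp⟩

theorem row_set_mask (row : List Int) (h : VRow row) (k : Nat) (hk : k ≤ 3) :
    rowMask (row.set k 1) = rowMask row ||| 1 <<< k := by
  obtain ⟨a, b, c, d, ha, hb, hc, hd, rfl⟩ := h
  interval_cases k <;> rcases ha with rfl | rfl <;> rcases hb with rfl | rfl <;>
    rcases hc with rfl | rfl <;> rcases hd with rfl | rfl <;> decide

theorem rowAll_corr (row : List Int) (h : VRow row) :
    rowAllA row = some (decide (rowMask row = 15)) := by
  obtain ⟨a, b, c, d, ha, hb, hc, hd, rfl⟩ := h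
  rcases ha with rfl | rfl <;> rcases hb with rfl | rfl <;>
    rcases hc with rfl | rfl <;> rcases hd with rfl | rfl <;> decide

theorem rowAny_corr (row : List Int) (h : VRow row) :
    rowAnyA row = some (decide (rowMask row ≠ 0)) := by
  obtain ⟨a, b, c, d, ha, hb, hc, hd, rfl⟩ := h
  rcases ha with rfl | rfl <;> rcases hb with rfl | rfl <;>
    rcases hc with rfl | rfl <;> rcases hd with rfl | rfl <;> decide

theorem row_count (row : List Int) (h : VRow row) :
    ((row.map fun v => if v ≠ 0 then (1 : Int) else 0).sum) =
      (PySem.Int.bitCount ((rowMask row : Nat) : Int) : Int) := by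
  obtain ⟨a, b, c, d, ha, hb, hc, hd, rfl⟩ := h
  rcases ha with rfl | rfl <;> rcases hb with rfl | rfl <;>
    rcases hc with rfl | rfl <;> rcases hd with rfl | rfl <;> decide

-- board-level bridge (boards are always six valid rows)

theorem board_row_V (b : List (List Int)) (h : VB b) (k : Nat) (hk : k ≤ 5) :
    VRow (b.getD k []) := by
  obtain ⟨r0, r1, r2, r3, r4, r5, h0, h1, h2, h3, h4, h5, rfl⟩ := h
  interval_cases k <;> simpa

theorem board_get (b : List (List Int)) (h : VB b) (k : Nat) (hk : k ≤ 5) :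
    PySem.List.pyGet? b (k : Int) = some (b.getD k []) := by
  obtain ⟨r0, r1, r2, r3, r4, r5, -, -, -, -, -, -, rfl⟩ := h
  interval_cases k <;> simp

theorem board_mask_get (b : List (List Int)) (h : VB b) (k : Nat) (hk : k ≤ 5) :
    (b.map rowMask).getD k 0 = rowMask (b.getD k []) := by
  obtain ⟨r0, r1, r2, r3, r4, r5, -, -, -, -, -, -, rfl⟩ := h
  interval_cases k <;> simp

theorem cellGet_corr (b : List (List Int)) (h : VB b) (k : Nat) (hk : k ≤ 5)
    (c : Nat) (hc : c ≤ 3) :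
    cellGetA b (k : Int) (c : Int) = some ((b.getD k []).getD c 0) := by
  rw [cellGetA, board_get b h k hk, Option.bind_some,
      row_get _ (board_row_V b h k hk) c hc]

theorem cellSet_eq (b : List (List Int)) (h : VB b) (k : Nat) (hk : k ≤ 5)
    (c : Nat) (hc : c ≤ 3) :
    cellSetA b (k : Int) (c : Int) 1 = some (b.set k ((b.getD k []).set c 1)) := by
  obtain ⟨r0, r1, r2, r3, r4, r5, h0, h1, h2, h3, h4, h5, rfl⟩ := h
  have hV : ∀ r, VRow r → PySem.List.pySet? r (c : Int) 1 = some (r.set c 1) :=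
    fun r hr => row_set_eq r hr c hc
  interval_cases k <;>
    simp [cellSetA, hV r0 h0, hV r1 h1, hV r2 h2, hV r3 h3, hV r4 h4, hV r5 h5,
      PySem.List.pySet?, PySem.List.pyIdx?, rows_len r0 h0, rows_len r1 h1, rows_len r2 h2,
      rows_len r3 h3, rows_len r4 h4, rows_len r5 h5, Nat.lt_of_le_of_lt hc (by omega : (3:Nat) < 4)]

theorem board_set_V (b : List (List Int)) (h : VB b) (k : Nat) (row : List Int)
    (hr : VRow row) : VB (b.set k row) := by
  obtain ⟨r0, r1, r2, r3, r4, r5, h0, h1, h2, h3, h4, h5, rfl⟩ := h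
  match k with
  | 0 => exact ⟨row, r1, r2, r3, r4, r5, hr, h1, h2, h3, h4, h5, rfl⟩
  | 1 => exact ⟨r0, row, r2, r3, r4, r5, h0, hr, h2, h3, h4, h5, rfl⟩
  | 2 => exact ⟨r0, r1, row, r3, r4, r5, h0, h1, hr, h3, h4, h5, rfl⟩
  | 3 => exact ⟨r0, r1, r2, row, r4, r5, h0, h1, h2, hr, h4, h5, rfl⟩
  | 4 => exact ⟨r0, r1, r2, r3, row, r5, h0, h1, h2, h3, hr, h5, rfl⟩
  | 5 => exact ⟨r0, r1, r2, r3, r4, row, h0, h1, h2, h3, h4, hr, rfl⟩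
  | n + 6 => exact ⟨r0, r1, r2, r3, r4, r5, h0, h1, h2, h3, h4, h5, by simp⟩

theorem VRow_zero : VRow [0, 0, 0, 0] := ⟨0, 0, 0, 0, Or.inl rfl, Or.inl rfl, Or.inl rfl, Or.inl rfl, rfl⟩

theorem getD_set_self {a : Type} (l : List a) (i : Nat) (v d : a) (h : i < l.length) :
    (l.set i v).getD i d = v := by simp [List.getD, h]

theorem getD_set_ne {a : Type} (l : List a) (i j : Nat) (v d : a) (h : i ≠ j) :
    (l.set i v).getD j d = l.getD j d := by simp [List.getD, List.getElem?_set_ne h]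

theorem boards_len (b : List (List Int)) (h : VB b) : b.length = 6 := by
  obtain ⟨r0, r1, r2, r3, r4, r5, -, -, -, -, -, -, rfl⟩ := h; rfl

theorem board_bit (b : List (List Int)) (h : VB b) (k : Nat) (hk : k ≤ 5)
    (c : Nat) (hc : c ≤ 3) :
    ((b.getD k []).getD c 0 = 0) ↔ ((b.map rowMask).getD k 0 >>> c &&& 1 = 0) := by
  rw [board_mask_get b h k hk]; exact row_bit _ (board_row_V b h k hk) c hc


theorem addLoop_min (b : List (List Int)) (hb : VB b) (dr dc col T1 T2 : Nat)
    (hdr : dr ≤ 1) (hcd : col + dc ≤ 3)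
    (h11 : 1 ≤ T1) (h16 : T1 ≤ 6)
    (h1e : ∀ j, 1 ≤ j → j < T1 → (b.map rowMask).getD j 0 >>> col &&& 1 = 0)
    (h1o : T1 ≤ 5 → (b.map rowMask).getD T1 0 >>> col &&& 1 ≠ 0)
    (h21 : 1 + dr ≤ T2) (h26 : T2 ≤ 6)
    (h2e : ∀ j, 1 + dr ≤ j → j < T2 → (b.map rowMask).getD j 0 >>> (col + dc) &&& 1 = 0)
    (h2o : T2 ≤ 5 → (b.map rowMask).getD T2 0 >>> (col + dc) &&& 1 ≠ 0) :
    ∀ (fuel r : Nat), r ≤ min (5 - dr) (min (T1 - 1) (T2 - 1 - dr)) →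
      min (5 - dr) (min (T1 - 1) (T2 - 1 - dr)) ≤ r + fuel →
      addLoopA b (dr : Int) (dc : Int) (col : Int) ((r : Nat) : Int) fuel =
        some ((min (5 - dr) (min (T1 - 1) (T2 - 1 - dr)) : Nat) : Int) := by
  set R := min (5 - dr) (min (T1 - 1) (T2 - 1 - dr)) with hRdef
  have hmin1 : R ≤ 5 - dr := min_le_left _ _
  have hmin2 : R ≤ T1 - 1 := le_trans (min_le_right _ _) (min_le_left _ _)
  have hmin3 : R ≤ T2 - 1 - dr := le_trans (min_le_right _ _) (min_le_right _ _)
  intro fuel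
  induction fuel with
  | zero =>
    intro r hr1 hr2
    have : r = R := by omega
    subst this
    rfl
  | succ n ih =>
    intro r hrR hfu
    rw [addLoopA]
    by_cases hrEq : r = R
    · by_cases h5 : r + dr < 5
      · have hrmin : r = min (T1 - 1) (T2 - 1 - dr) := by omega
        by_cases hT1case : T1 - 1 ≤ T2 - 1 - dr
        · have hT1b : T1 = r + 1 := by omega
          have hT15 : T1 ≤ 5 := by omega
          rw [if_pos (by push_cast; omega)]
          rw [show ((r : Nat) : Int) + 1 = ((r + 1 : Nat) : Int) by push_cast; ring]
          rw [cellGet_corr b hb (r + 1) (by omega) col (by omega), Option.bind_some]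
          have hocc : ¬ (b.getD (r + 1) []).getD col 0 = 0 := by
            intro hz
            have hbit := (board_bit b hb (r + 1) (by omega) col (by omega)).mp hz
            refine h1o hT15 ?_
            rw [hT1b]
            exact hbit
          rw [if_neg hocc, hrEq]
        · have hT2b : T2 = r + 1 + dr := by omega
          have hT25 : T2 ≤ 5 := by omega
          rw [if_pos (by push_cast; omega)]
          rw [show ((r : Nat) : Int) + 1 = ((r + 1 : Nat) : Int) by push_cast; ring]
          rw [cellGet_corr b hb (r + 1) (by omega) col (by omega), Option.bind_some]
          have hv1 : (b.getD (r + 1) []).getD col 0 = 0 :=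
            (board_bit b hb (r + 1) (by omega) col (by omega)).mpr
              (h1e (r + 1) (by omega) (by omega))
          rw [if_pos hv1]
          rw [show ((r + 1 : Nat) : Int) + (dr : Int) = ((r + 1 + dr : Nat) : Int) by push_cast; ring,
              show ((col : Nat) : Int) + (dc : Int) = ((col + dc : Nat) : Int) by push_cast; ring]
          rw [cellGet_corr b hb (r + 1 + dr) (by omega) (col + dc) (by omega), Option.bind_some]
          have hocc2 : ¬ (b.getD (r + 1 + dr) []).getD (col + dc) 0 = 0 := by
            intro hz
            have hbit := (board_bit b hb (r + 1 + dr) (by omega) (col + dc) (by omega)).mp hz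
            refine h2o hT25 ?_
            rw [hT2b]
            exact hbit
          rw [if_neg hocc2, hrEq]
      · rw [if_neg (by push_cast; omega), hrEq]
    · have hrlt : r < R := by omega
      rw [if_pos (by push_cast; omega)]
      rw [show ((r : Nat) : Int) + 1 = ((r + 1 : Nat) : Int) by push_cast; ring]
      rw [cellGet_corr b hb (r + 1) (by omega) col (by omega), Option.bind_some]
      have hv1 : (b.getD (r + 1) []).getD col 0 = 0 :=
        (board_bit b hb (r + 1) (by omega) col (by omega)).mpr
          (h1e (r + 1) (by omega) (by omega))
      rw [if_pos hv1]
      rw [show ((r + 1 : Nat) : Int) + (dr : Int) = ((r + 1 + dr : Nat) : Int) by push_cast; ring,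
          show ((col : Nat) : Int) + (dc : Int) = ((col + dc : Nat) : Int) by push_cast; ring]
      rw [cellGet_corr b hb (r + 1 + dr) (by omega) (col + dc) (by omega), Option.bind_some]
      have hv2 : (b.getD (r + 1 + dr) []).getD (col + dc) 0 = 0 :=
        (board_bit b hb (r + 1 + dr) (by omega) (col + dc) (by omega)).mpr
          (h2e (r + 1 + dr) (by omega) (by omega))
      rw [if_pos hv2]
      exact ih (r + 1) (by omega) (by omega)

theorem addBlock_corr (b : List (List Int)) (hb : VB b) (t : Int) (dr dc col R : Nat)
    (ht : blockOffsetsA t = some ((dr : Int), (dc : Int))) (hdr : dr ≤ 1) (hcd : col + dc ≤ 3)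
    (hR5 : R + dr ≤ 5)
    (hloop : addLoopA b (dr : Int) (dc : Int) (col : Int) ((0 : Nat) : Int) 6 = some ((R : Nat) : Int)) :
    ∃ b', addBlockA b t (col : Int) = some b' ∧ VB b' ∧
      b'.map rowMask =
        ((b.map rowMask).set R ((b.map rowMask).getD R 0 ||| 1 <<< col)).set (R + dr)
          ((((b.map rowMask).set R ((b.map rowMask).getD R 0 ||| 1 <<< col)).getD (R + dr) 0) |||
            1 <<< (col + dc)) := by
  have hcol : col ≤ 3 := by omega
  have hrV : VRow (b.getD R []) := board_row_V b hb R (by omega)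
  have hb1 : VB (b.set R ((b.getD R []).set col 1)) :=
    board_set_V b hb R _ (row_set_V _ hrV col)
  have hlen : b.length = 6 := boards_len b hb
  have e0 : ((0 : Nat) : Int) = (0 : Int) := rfl
  have e1 : ((R : Nat) : Int) + (dr : Int) = ((R + dr : Nat) : Int) := by push_cast; ring
  have e2 : ((col : Nat) : Int) + (dc : Int) = ((col + dc : Nat) : Int) := by push_cast; ring
  refine ⟨(b.set R ((b.getD R []).set col 1)).set (R + dr)
      (((b.set R ((b.getD R []).set col 1)).getD (R + dr) []).set (col + dc) 1), ?_, ?_, ?_⟩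
  · rw [addBlockA, ht, Option.bind_some, ← e0, hloop, Option.bind_some,
        cellSet_eq b hb R (by omega) col hcol, Option.bind_some, e1, e2,
        cellSet_eq _ hb1 (R + dr) (by omega) (col + dc) hcd]
  · exact board_set_V _ hb1 (R + dr) _
      (row_set_V _ (board_row_V _ hb1 (R + dr) (by omega)) (col + dc))
  · rw [List.map_set, List.map_set]
    have hm1 : rowMask ((b.getD R []).set col 1) = (b.map rowMask).getD R 0 ||| 1 <<< col := by
      rw [row_set_mask _ hrV col hcol, board_mask_get b hb R (by omega)]
    rw [hm1]
    congr 1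
    rw [row_set_mask _ (board_row_V _ hb1 (R + dr) (by omega)) (col + dc) hcd]
    congr 1
    rcases Nat.eq_zero_or_pos dr with hdz | hdz
    · subst hdz
      rw [Nat.add_zero, getD_set_self _ _ _ _ (by rw [hlen]; omega),
          getD_set_self _ _ _ _ (by simp [hlen]; omega), hm1]
    · have hne : R ≠ R + dr := by omega
      rw [getD_set_ne _ _ _ _ _ hne, getD_set_ne _ _ _ _ _ hne,
          board_mask_get b hb (R + dr) (by omega)]

-- first-occupied-scan specifications for B's closed-form drop
theorem topB_spec1 (m : List Nat) (col : Nat) :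
    1 ≤ topB m col (PySem.List.pyRange 1 6 1) ∧
    topB m col (PySem.List.pyRange 1 6 1) ≤ 6 ∧
    (∀ j, 1 ≤ j → j < topB m col (PySem.List.pyRange 1 6 1) → m.getD j 0 >>> col &&& 1 = 0) ∧
    (topB m col (PySem.List.pyRange 1 6 1) ≤ 5 →
      m.getD (topB m col (PySem.List.pyRange 1 6 1)) 0 >>> col &&& 1 ≠ 0) := by
  rw [show PySem.List.pyRange 1 6 1 = [1,2,3,4,5] from by decide]
  simp only [topB, show ((1:Int)).toNat = 1 from rfl, show ((2:Int)).toNat = 2 from rfl,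
    show ((3:Int)).toNat = 3 from rfl, show ((4:Int)).toNat = 4 from rfl,
    show ((5:Int)).toNat = 5 from rfl]
  split_ifs with h1 h2 h3 h4 h5 <;>
    refine ⟨by omega, by omega, fun j hj1 hj2 => ?_, fun hT => ?_⟩ <;>
    first
      | omega
      | (interval_cases j <;> simp_all)
      | simp_all

theorem topB_spec2 (m : List Nat) (col : Nat) :
    2 ≤ topB m col (PySem.List.pyRange 2 6 1) ∧
    topB m col (PySem.List.pyRange 2 6 1) ≤ 6 ∧
    (∀ j, 2 ≤ j → j < topB m col (PySem.List.pyRange 2 6 1) → m.getD j 0 >>> col &&& 1 = 0) ∧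
    (topB m col (PySem.List.pyRange 2 6 1) ≤ 5 →
      m.getD (topB m col (PySem.List.pyRange 2 6 1)) 0 >>> col &&& 1 ≠ 0) := by
  rw [show PySem.List.pyRange 2 6 1 = [2,3,4,5] from by decide]
  simp only [topB, show ((2:Int)).toNat = 2 from rfl,
    show ((3:Int)).toNat = 3 from rfl, show ((4:Int)).toNat = 4 from rfl,
    show ((5:Int)).toNat = 5 from rfl]
  split_ifs with h2 h3 h4 h5 <;>
    refine ⟨by omega, by omega, fun j hj1 hj2 => ?_, fun hT => ?_⟩ <;>
    first
      | omega
      | (interval_cases j <;> simp_all)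
      | simp_all

theorem topB_specD (m : List Nat) (col dr : Nat) (hdr : dr ≤ 1) :
    1 + dr ≤ topB m col (PySem.List.pyRange ((1 + dr : Nat) : Int) 6 1) ∧
    topB m col (PySem.List.pyRange ((1 + dr : Nat) : Int) 6 1) ≤ 6 ∧
    (∀ j, 1 + dr ≤ j → j < topB m col (PySem.List.pyRange ((1 + dr : Nat) : Int) 6 1) →
      m.getD j 0 >>> col &&& 1 = 0) ∧
    (topB m col (PySem.List.pyRange ((1 + dr : Nat) : Int) 6 1) ≤ 5 →
      m.getD (topB m col (PySem.List.pyRange ((1 + dr : Nat) : Int) 6 1)) 0 >>> col &&& 1 ≠ 0) := by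
  interval_cases dr
  · simpa using topB_spec1 m col
  · simpa using topB_spec2 m col

theorem light2_closed (x0 x1 x2 x3 x4 x5 : Nat) :
    lightMask (lightMask [x0, x1, x2, x3, x4, x5]) = lightB [x0, x1, x2, x3, x4, x5] := by
  by_cases h1 : x1 = 0 <;> by_cases h0 : x0 = 0 <;>
    simp [lightMask, lightB, h0, h1, List.eraseIdx]

theorem light_post (x0 x1 x2 x3 x4 x5 : Nat) (himp : x0 ≠ 0 → x1 ≠ 0) :
    (lightB [x0, x1, x2, x3, x4, x5]).getD 0 0 = 0 ∧
    (lightB [x0, x1, x2, x3, x4, x5]).getD 1 0 = 0 := by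
  by_cases h1 : x1 = 0 <;> by_cases h0 : x0 = 0 <;>
    simp_all [lightB]

theorem getD_set_ne' {a : Type} (l : List a) (i j : Nat) (v d : a) (h : i ≠ j) :
    (l.set i v).getD j d = l.getD j d := by simp [List.getD, List.getElem?_set_ne h]

theorem getD_set_self' {a : Type} (l : List a) (i : Nat) (v d : a) (h : i < l.length) :
    (l.set i v).getD i d = v := by simp [List.getD, h]

theorem shl_ne_15 (a : Nat) (ha : a ≤ 3) : 1 <<< a ≠ 15 := by interval_cases a <;> decide

theorem shl_or_ne_15 (a c : Nat) (ha : a ≤ 3) (hc : c ≤ 3) : (1 <<< a ||| 1 <<< c) ≠ 15 := by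
  interval_cases a <;> interval_cases c <;> decide

theorem shl_ne_0 (a : Nat) : 1 <<< a ≠ 0 := by
  simp [Nat.shiftLeft_eq]

theorem postadd_facts (m : List Nat) (hlen : m.length = 6)
    (hm0 : m.getD 0 0 = 0) (hm1 : m.getD 1 0 = 0)
    (R dr dc col : Nat) (hdr : dr ≤ 1) (hcol : col ≤ 3) (hcd : col + dc ≤ 3)
    (hR5 : R + dr ≤ 5) (hR1 : dr = 0 → 1 ≤ R) :
    (((m.set R (m.getD R 0 ||| 1 <<< col)).set (R + dr)
        (((m.set R (m.getD R 0 ||| 1 <<< col)).getD (R + dr) 0) ||| 1 <<< (col + dc)))).getD 0 0 ≠ 15 ∧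
    (((m.set R (m.getD R 0 ||| 1 <<< col)).set (R + dr)
        (((m.set R (m.getD R 0 ||| 1 <<< col)).getD (R + dr) 0) ||| 1 <<< (col + dc)))).getD 1 0 ≠ 15 ∧
    ((((m.set R (m.getD R 0 ||| 1 <<< col)).set (R + dr)
        (((m.set R (m.getD R 0 ||| 1 <<< col)).getD (R + dr) 0) ||| 1 <<< (col + dc)))).getD 0 0 ≠ 0 →
      (((m.set R (m.getD R 0 ||| 1 <<< col)).set (R + dr)
        (((m.set R (m.getD R 0 ||| 1 <<< col)).getD (R + dr) 0) ||| 1 <<< (col + dc)))).getD 1 0 ≠ 0) := by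
  interval_cases dr
  · -- dr = 0: the block only touches row R ≥ 1
    have hR : 1 ≤ R := hR1 rfl
    simp only [Nat.add_zero]
    have g0 : ((m.set R (m.getD R 0 ||| 1 <<< col)).set R
        (((m.set R (m.getD R 0 ||| 1 <<< col)).getD R 0) ||| 1 <<< (col + dc))).getD 0 0 = 0 := by
      rw [getD_set_ne' _ _ _ _ _ (by omega), getD_set_ne' _ _ _ _ _ (by omega)]; exact hm0
    refine ⟨by rw [g0]; decide, ?_, fun h => absurd g0 h⟩
    by_cases hR1' : R = 1
    · subst hR1'
      rw [getD_set_self' _ _ _ _ (by simp [hlen]),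
          getD_set_self' _ _ _ _ (by simp [hlen]), hm1]
      simpa using shl_or_ne_15 col (col + dc) hcol hcd
    · rw [getD_set_ne' _ _ _ _ _ (by omega), getD_set_ne' _ _ _ _ _ (by omega), hm1]
      decide
  · -- dr = 1: rows R and R+1
    by_cases hR0 : R = 0
    · subst hR0
      simp only [Nat.zero_add]
      rw [getD_set_ne' _ _ _ _ _ (by omega), getD_set_self' _ _ _ _ (by simp [hlen]), hm0,
          getD_set_self' _ _ _ _ (by simp [hlen]),
          getD_set_ne' _ _ _ _ _ (by omega), hm1]
      refine ⟨by simpa using shl_ne_15 col hcol, by simpa using shl_ne_15 (col + dc) hcd, ?_⟩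
      intro _
      simpa using shl_ne_0 (col + dc)
    · by_cases hR1' : R = 1
      · subst hR1'
        rw [getD_set_ne' _ _ _ _ _ (by omega), getD_set_ne' _ _ _ _ _ (by omega),
            getD_set_ne' _ _ _ _ _ (by omega), getD_set_self' _ _ _ _ (by simp [hlen]), hm0, hm1]
        exact ⟨by decide, by simpa using shl_ne_15 col hcol, fun h => absurd rfl h⟩
      · rw [getD_set_ne' _ _ _ _ _ (by omega), getD_set_ne' _ _ _ _ _ (by omega),
            getD_set_ne' _ _ _ _ _ (by omega), getD_set_ne' _ _ _ _ _ (by omega), hm0, hm1]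
        exact ⟨by decide, by decide, fun h => absurd rfl h⟩

theorem clearSeq_some (m m' : List Nat) (s : Int) (n : Nat) (r : Int)
    (h : findFullB m (PySem.List.pyRange 5 1 (-1)) = some r)
    (h2 : (0 : Nat) :: m.eraseIdx r.toNat = m') :
    clearSeq m s (n + 1) = clearSeq m' (s + 1) n := by subst h2; simp only [clearSeq, h]

theorem clearSeq_none (m : List Nat) (s : Int) (n : Nat)
    (h : findFullB m (PySem.List.pyRange 5 1 (-1)) = none) :
    clearSeq m s (n + 1) = (m, s) := by simp only [clearSeq, h]

theorem seq_batch (m : List Nat) (hlen : m.length = 6) (s : Int)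
    (h0 : m.getD 0 0 ≠ 15) (h1 : m.getD 1 0 ≠ 15)
    (himp : m.getD 0 0 ≠ 0 → m.getD 1 0 ≠ 0) :
    clearSeq m s 8 = ((clearB m).1, s + (clearB m).2) ∧
    (clearB m).1.getD 0 0 ≠ 15 ∧ (clearB m).1.getD 1 0 ≠ 15 ∧
    ((clearB m).1.getD 0 0 ≠ 0 → (clearB m).1.getD 1 0 ≠ 0) := by
  obtain ⟨x0, x1, x2, x3, x4, x5, rfl⟩ : ∃ a b c d e f, m = [a, b, c, d, e, f] := by
    rcases m with _ | ⟨a, _ | ⟨b, _ | ⟨c, _ | ⟨d, _ | ⟨e, _ | ⟨f, _ | ⟨g, t⟩⟩⟩⟩⟩⟩⟩ <;>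
      simp at hlen
    exact ⟨a, b, c, d, e, f, rfl⟩
  simp only [List.getD_cons_zero, List.getD_cons_succ] at h0 h1 himp
  have hr : PySem.List.pyRange 5 1 (-1) = [5, 4, 3, 2] := by decide
  by_cases h2 : x2 = 15 <;> by_cases h3 : x3 = 15 <;> by_cases h4 : x4 = 15 <;>
    by_cases h5 : x5 = 15
  · -- case
    have f1 : findFullB [x0, x1, x2, x3, x4, x5] (PySem.List.pyRange 5 1 (-1)) = some 5 := by simp [findFullB, hr, h0, h1, h2, h3, h4, h5]
    have f2 : findFullB [0, x0, x1, x2, x3, x4] (PySem.List.pyRange 5 1 (-1)) = some 5 := by simp [findFullB, hr, h0, h1, h2, h3, h4, h5]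
    have f3 : findFullB [0, 0, x0, x1, x2, x3] (PySem.List.pyRange 5 1 (-1)) = some 5 := by simp [findFullB, hr, h0, h1, h2, h3, h4, h5]
    have f4 : findFullB [0, 0, 0, x0, x1, x2] (PySem.List.pyRange 5 1 (-1)) = some 5 := by simp [findFullB, hr, h0, h1, h2, h3, h4, h5]
    have f5 : findFullB [0, 0, 0, 0, x0, x1] (PySem.List.pyRange 5 1 (-1)) = none := by simp [findFullB, hr, h0, h1, h2, h3, h4, h5]
    refine ⟨?_, ?_, ?_, ?_⟩
    · rw [show (8:Nat) = 7+1 from rfl, show clearSeq [x0, x1, x2, x3, x4, x5] s (7+1) = clearSeq [0, x0, x1, x2, x3, x4] (s + 1) 7 from clearSeq_some _ _ _ _ _ f1 rfl]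
      rw [show (7:Nat) = 6+1 from rfl, show clearSeq [0, x0, x1, x2, x3, x4] (s + 1) (6+1) = clearSeq [0, 0, x0, x1, x2, x3] ((s + 1) + 1) 6 from clearSeq_some _ _ _ _ _ f2 rfl]
      rw [show (6:Nat) = 5+1 from rfl, show clearSeq [0, 0, x0, x1, x2, x3] ((s + 1) + 1) (5+1) = clearSeq [0, 0, 0, x0, x1, x2] (((s + 1) + 1) + 1) 5 from clearSeq_some _ _ _ _ _ f3 rfl]
      rw [show (5:Nat) = 4+1 from rfl, show clearSeq [0, 0, 0, x0, x1, x2] (((s + 1) + 1) + 1) (4+1) = clearSeq [0, 0, 0, 0, x0, x1] ((((s + 1) + 1) + 1) + 1) 4 from clearSeq_some _ _ _ _ _ f4 rfl]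
      rw [show (4:Nat) = 3+1 from rfl, clearSeq_none _ _ _ f5]
      simp [clearB, PySem.List.enumerate, h0, h1, h2, h3, h4, h5]
      try omega
    · simp_all [clearB, PySem.List.enumerate]
    · simp_all [clearB, PySem.List.enumerate]
    · simp_all [clearB, PySem.List.enumerate]
  · -- case
    have f1 : findFullB [x0, x1, x2, x3, x4, x5] (PySem.List.pyRange 5 1 (-1)) = some 4 := by simp [findFullB, hr, h0, h1, h2, h3, h4, h5]
    have f2 : findFullB [0, x0, x1, x2, x3, x5] (PySem.List.pyRange 5 1 (-1)) = some 4 := by simp [findFullB, hr, h0, h1, h2, h3, h4, h5]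
    have f3 : findFullB [0, 0, x0, x1, x2, x5] (PySem.List.pyRange 5 1 (-1)) = some 4 := by simp [findFullB, hr, h0, h1, h2, h3, h4, h5]
    have f4 : findFullB [0, 0, 0, x0, x1, x5] (PySem.List.pyRange 5 1 (-1)) = none := by simp [findFullB, hr, h0, h1, h2, h3, h4, h5]
    refine ⟨?_, ?_, ?_, ?_⟩
    · rw [show (8:Nat) = 7+1 from rfl, show clearSeq [x0, x1, x2, x3, x4, x5] s (7+1) = clearSeq [0, x0, x1, x2, x3, x5] (s + 1) 7 from clearSeq_some _ _ _ _ _ f1 rfl]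
      rw [show (7:Nat) = 6+1 from rfl, show clearSeq [0, x0, x1, x2, x3, x5] (s + 1) (6+1) = clearSeq [0, 0, x0, x1, x2, x5] ((s + 1) + 1) 6 from clearSeq_some _ _ _ _ _ f2 rfl]
      rw [show (6:Nat) = 5+1 from rfl, show clearSeq [0, 0, x0, x1, x2, x5] ((s + 1) + 1) (5+1) = clearSeq [0, 0, 0, x0, x1, x5] (((s + 1) + 1) + 1) 5 from clearSeq_some _ _ _ _ _ f3 rfl]
      rw [show (5:Nat) = 4+1 from rfl, clearSeq_none _ _ _ f4]
      simp [clearB, PySem.List.enumerate, h0, h1, h2, h3, h4, h5]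
      try omega
    · simp_all [clearB, PySem.List.enumerate]
    · simp_all [clearB, PySem.List.enumerate]
    · simp_all [clearB, PySem.List.enumerate]
  · -- case
    have f1 : findFullB [x0, x1, x2, x3, x4, x5] (PySem.List.pyRange 5 1 (-1)) = some 5 := by simp [findFullB, hr, h0, h1, h2, h3, h4, h5]
    have f2 : findFullB [0, x0, x1, x2, x3, x4] (PySem.List.pyRange 5 1 (-1)) = some 4 := by simp [findFullB, hr, h0, h1, h2, h3, h4, h5]
    have f3 : findFullB [0, 0, x0, x1, x2, x4] (PySem.List.pyRange 5 1 (-1)) = some 4 := by simp [findFullB, hr, h0, h1, h2, h3, h4, h5]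
    have f4 : findFullB [0, 0, 0, x0, x1, x4] (PySem.List.pyRange 5 1 (-1)) = none := by simp [findFullB, hr, h0, h1, h2, h3, h4, h5]
    refine ⟨?_, ?_, ?_, ?_⟩
    · rw [show (8:Nat) = 7+1 from rfl, show clearSeq [x0, x1, x2, x3, x4, x5] s (7+1) = clearSeq [0, x0, x1, x2, x3, x4] (s + 1) 7 from clearSeq_some _ _ _ _ _ f1 rfl]
      rw [show (7:Nat) = 6+1 from rfl, show clearSeq [0, x0, x1, x2, x3, x4] (s + 1) (6+1) = clearSeq [0, 0, x0, x1, x2, x4] ((s + 1) + 1) 6 from clearSeq_some _ _ _ _ _ f2 rfl]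
      rw [show (6:Nat) = 5+1 from rfl, show clearSeq [0, 0, x0, x1, x2, x4] ((s + 1) + 1) (5+1) = clearSeq [0, 0, 0, x0, x1, x4] (((s + 1) + 1) + 1) 5 from clearSeq_some _ _ _ _ _ f3 rfl]
      rw [show (5:Nat) = 4+1 from rfl, clearSeq_none _ _ _ f4]
      simp [clearB, PySem.List.enumerate, h0, h1, h2, h3, h4, h5]
      try omega
    · simp_all [clearB, PySem.List.enumerate]
    · simp_all [clearB, PySem.List.enumerate]
    · simp_all [clearB, PySem.List.enumerate]
  · -- case
    have f1 : findFullB [x0, x1, x2, x3, x4, x5] (PySem.List.pyRange 5 1 (-1)) = some 3 := by simp [findFullB, hr, h0, h1, h2, h3, h4, h5]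
    have f2 : findFullB [0, x0, x1, x2, x4, x5] (PySem.List.pyRange 5 1 (-1)) = some 3 := by simp [findFullB, hr, h0, h1, h2, h3, h4, h5]
    have f3 : findFullB [0, 0, x0, x1, x4, x5] (PySem.List.pyRange 5 1 (-1)) = none := by simp [findFullB, hr, h0, h1, h2, h3, h4, h5]
    refine ⟨?_, ?_, ?_, ?_⟩
    · rw [show (8:Nat) = 7+1 from rfl, show clearSeq [x0, x1, x2, x3, x4, x5] s (7+1) = clearSeq [0, x0, x1, x2, x4, x5] (s + 1) 7 from clearSeq_some _ _ _ _ _ f1 rfl]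
      rw [show (7:Nat) = 6+1 from rfl, show clearSeq [0, x0, x1, x2, x4, x5] (s + 1) (6+1) = clearSeq [0, 0, x0, x1, x4, x5] ((s + 1) + 1) 6 from clearSeq_some _ _ _ _ _ f2 rfl]
      rw [show (6:Nat) = 5+1 from rfl, clearSeq_none _ _ _ f3]
      simp [clearB, PySem.List.enumerate, h0, h1, h2, h3, h4, h5]
      try omega
    · simp_all [clearB, PySem.List.enumerate]
    · simp_all [clearB, PySem.List.enumerate]
    · simp_all [clearB, PySem.List.enumerate]
  · -- case
    have f1 : findFullB [x0, x1, x2, x3, x4, x5] (PySem.List.pyRange 5 1 (-1)) = some 5 := by simp [findFullB, hr, h0, h1, h2, h3, h4, h5]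
    have f2 : findFullB [0, x0, x1, x2, x3, x4] (PySem.List.pyRange 5 1 (-1)) = some 5 := by simp [findFullB, hr, h0, h1, h2, h3, h4, h5]
    have f3 : findFullB [0, 0, x0, x1, x2, x3] (PySem.List.pyRange 5 1 (-1)) = some 4 := by simp [findFullB, hr, h0, h1, h2, h3, h4, h5]
    have f4 : findFullB [0, 0, 0, x0, x1, x3] (PySem.List.pyRange 5 1 (-1)) = none := by simp [findFullB, hr, h0, h1, h2, h3, h4, h5]
    refine ⟨?_, ?_, ?_, ?_⟩
    · rw [show (8:Nat) = 7+1 from rfl, show clearSeq [x0, x1, x2, x3, x4, x5] s (7+1) = clearSeq [0, x0, x1, x2, x3, x4] (s + 1) 7 from clearSeq_some _ _ _ _ _ f1 rfl]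
      rw [show (7:Nat) = 6+1 from rfl, show clearSeq [0, x0, x1, x2, x3, x4] (s + 1) (6+1) = clearSeq [0, 0, x0, x1, x2, x3] ((s + 1) + 1) 6 from clearSeq_some _ _ _ _ _ f2 rfl]
      rw [show (6:Nat) = 5+1 from rfl, show clearSeq [0, 0, x0, x1, x2, x3] ((s + 1) + 1) (5+1) = clearSeq [0, 0, 0, x0, x1, x3] (((s + 1) + 1) + 1) 5 from clearSeq_some _ _ _ _ _ f3 rfl]
      rw [show (5:Nat) = 4+1 from rfl, clearSeq_none _ _ _ f4]
      simp [clearB, PySem.List.enumerate, h0, h1, h2, h3, h4, h5]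
      try omega
    · simp_all [clearB, PySem.List.enumerate]
    · simp_all [clearB, PySem.List.enumerate]
    · simp_all [clearB, PySem.List.enumerate]
  · -- case
    have f1 : findFullB [x0, x1, x2, x3, x4, x5] (PySem.List.pyRange 5 1 (-1)) = some 4 := by simp [findFullB, hr, h0, h1, h2, h3, h4, h5]
    have f2 : findFullB [0, x0, x1, x2, x3, x5] (PySem.List.pyRange 5 1 (-1)) = some 3 := by simp [findFullB, hr, h0, h1, h2, h3, h4, h5]
    have f3 : findFullB [0, 0, x0, x1, x3, x5] (PySem.List.pyRange 5 1 (-1)) = none := by simp [findFullB, hr, h0, h1, h2, h3, h4, h5]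
    refine ⟨?_, ?_, ?_, ?_⟩
    · rw [show (8:Nat) = 7+1 from rfl, show clearSeq [x0, x1, x2, x3, x4, x5] s (7+1) = clearSeq [0, x0, x1, x2, x3, x5] (s + 1) 7 from clearSeq_some _ _ _ _ _ f1 rfl]
      rw [show (7:Nat) = 6+1 from rfl, show clearSeq [0, x0, x1, x2, x3, x5] (s + 1) (6+1) = clearSeq [0, 0, x0, x1, x3, x5] ((s + 1) + 1) 6 from clearSeq_some _ _ _ _ _ f2 rfl]
      rw [show (6:Nat) = 5+1 from rfl, clearSeq_none _ _ _ f3]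
      simp [clearB, PySem.List.enumerate, h0, h1, h2, h3, h4, h5]
      try omega
    · simp_all [clearB, PySem.List.enumerate]
    · simp_all [clearB, PySem.List.enumerate]
    · simp_all [clearB, PySem.List.enumerate]
  · -- case
    have f1 : findFullB [x0, x1, x2, x3, x4, x5] (PySem.List.pyRange 5 1 (-1)) = some 5 := by simp [findFullB, hr, h0, h1, h2, h3, h4, h5]
    have f2 : findFullB [0, x0, x1, x2, x3, x4] (PySem.List.pyRange 5 1 (-1)) = some 3 := by simp [findFullB, hr, h0, h1, h2, h3, h4, h5]
    have f3 : findFullB [0, 0, x0, x1, x3, x4] (PySem.List.pyRange 5 1 (-1)) = none := by simp [findFullB, hr, h0, h1, h2, h3, h4, h5]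
    refine ⟨?_, ?_, ?_, ?_⟩
    · rw [show (8:Nat) = 7+1 from rfl, show clearSeq [x0, x1, x2, x3, x4, x5] s (7+1) = clearSeq [0, x0, x1, x2, x3, x4] (s + 1) 7 from clearSeq_some _ _ _ _ _ f1 rfl]
      rw [show (7:Nat) = 6+1 from rfl, show clearSeq [0, x0, x1, x2, x3, x4] (s + 1) (6+1) = clearSeq [0, 0, x0, x1, x3, x4] ((s + 1) + 1) 6 from clearSeq_some _ _ _ _ _ f2 rfl]
      rw [show (6:Nat) = 5+1 from rfl, clearSeq_none _ _ _ f3]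
      simp [clearB, PySem.List.enumerate, h0, h1, h2, h3, h4, h5]
      try omega
    · simp_all [clearB, PySem.List.enumerate]
    · simp_all [clearB, PySem.List.enumerate]
    · simp_all [clearB, PySem.List.enumerate]
  · -- case
    have f1 : findFullB [x0, x1, x2, x3, x4, x5] (PySem.List.pyRange 5 1 (-1)) = some 2 := by simp [findFullB, hr, h0, h1, h2, h3, h4, h5]
    have f2 : findFullB [0, x0, x1, x3, x4, x5] (PySem.List.pyRange 5 1 (-1)) = none := by simp [findFullB, hr, h0, h1, h2, h3, h4, h5]
    refine ⟨?_, ?_, ?_, ?_⟩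
    · rw [show (8:Nat) = 7+1 from rfl, show clearSeq [x0, x1, x2, x3, x4, x5] s (7+1) = clearSeq [0, x0, x1, x3, x4, x5] (s + 1) 7 from clearSeq_some _ _ _ _ _ f1 rfl]
      rw [show (7:Nat) = 6+1 from rfl, clearSeq_none _ _ _ f2]
      simp [clearB, PySem.List.enumerate, h0, h1, h2, h3, h4, h5]
      try omega
    · simp_all [clearB, PySem.List.enumerate]
    · simp_all [clearB, PySem.List.enumerate]
    · simp_all [clearB, PySem.List.enumerate]
  · -- case
    have f1 : findFullB [x0, x1, x2, x3, x4, x5] (PySem.List.pyRange 5 1 (-1)) = some 5 := by simp [findFullB, hr, h0, h1, h2, h3, h4, h5]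
    have f2 : findFullB [0, x0, x1, x2, x3, x4] (PySem.List.pyRange 5 1 (-1)) = some 5 := by simp [findFullB, hr, h0, h1, h2, h3, h4, h5]
    have f3 : findFullB [0, 0, x0, x1, x2, x3] (PySem.List.pyRange 5 1 (-1)) = some 5 := by simp [findFullB, hr, h0, h1, h2, h3, h4, h5]
    have f4 : findFullB [0, 0, 0, x0, x1, x2] (PySem.List.pyRange 5 1 (-1)) = none := by simp [findFullB, hr, h0, h1, h2, h3, h4, h5]
    refine ⟨?_, ?_, ?_, ?_⟩
    · rw [show (8:Nat) = 7+1 from rfl, show clearSeq [x0, x1, x2, x3, x4, x5] s (7+1) = clearSeq [0, x0, x1, x2, x3, x4] (s + 1) 7 from clearSeq_some _ _ _ _ _ f1 rfl]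
      rw [show (7:Nat) = 6+1 from rfl, show clearSeq [0, x0, x1, x2, x3, x4] (s + 1) (6+1) = clearSeq [0, 0, x0, x1, x2, x3] ((s + 1) + 1) 6 from clearSeq_some _ _ _ _ _ f2 rfl]
      rw [show (6:Nat) = 5+1 from rfl, show clearSeq [0, 0, x0, x1, x2, x3] ((s + 1) + 1) (5+1) = clearSeq [0, 0, 0, x0, x1, x2] (((s + 1) + 1) + 1) 5 from clearSeq_some _ _ _ _ _ f3 rfl]
      rw [show (5:Nat) = 4+1 from rfl, clearSeq_none _ _ _ f4]
      simp [clearB, PySem.List.enumerate, h0, h1, h2, h3, h4, h5]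
      try omega
    · simp_all [clearB, PySem.List.enumerate]
    · simp_all [clearB, PySem.List.enumerate]
    · simp_all [clearB, PySem.List.enumerate]
  · -- case
    have f1 : findFullB [x0, x1, x2, x3, x4, x5] (PySem.List.pyRange 5 1 (-1)) = some 4 := by simp [findFullB, hr, h0, h1, h2, h3, h4, h5]
    have f2 : findFullB [0, x0, x1, x2, x3, x5] (PySem.List.pyRange 5 1 (-1)) = some 4 := by simp [findFullB, hr, h0, h1, h2, h3, h4, h5]
    have f3 : findFullB [0, 0, x0, x1, x2, x5] (PySem.List.pyRange 5 1 (-1)) = none := by simp [findFullB, hr, h0, h1, h2, h3, h4, h5]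
    refine ⟨?_, ?_, ?_, ?_⟩
    · rw [show (8:Nat) = 7+1 from rfl, show clearSeq [x0, x1, x2, x3, x4, x5] s (7+1) = clearSeq [0, x0, x1, x2, x3, x5] (s + 1) 7 from clearSeq_some _ _ _ _ _ f1 rfl]
      rw [show (7:Nat) = 6+1 from rfl, show clearSeq [0, x0, x1, x2, x3, x5] (s + 1) (6+1) = clearSeq [0, 0, x0, x1, x2, x5] ((s + 1) + 1) 6 from clearSeq_some _ _ _ _ _ f2 rfl]
      rw [show (6:Nat) = 5+1 from rfl, clearSeq_none _ _ _ f3]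
      simp [clearB, PySem.List.enumerate, h0, h1, h2, h3, h4, h5]
      try omega
    · simp_all [clearB, PySem.List.enumerate]
    · simp_all [clearB, PySem.List.enumerate]
    · simp_all [clearB, PySem.List.enumerate]
  · -- case
    have f1 : findFullB [x0, x1, x2, x3, x4, x5] (PySem.List.pyRange 5 1 (-1)) = some 5 := by simp [findFullB, hr, h0, h1, h2, h3, h4, h5]
    have f2 : findFullB [0, x0, x1, x2, x3, x4] (PySem.List.pyRange 5 1 (-1)) = some 4 := by simp [findFullB, hr, h0, h1, h2, h3, h4, h5]
    have f3 : findFullB [0, 0, x0, x1, x2, x4] (PySem.List.pyRange 5 1 (-1)) = none := by simp [findFullB, hr, h0, h1, h2, h3, h4, h5]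
    refine ⟨?_, ?_, ?_, ?_⟩
    · rw [show (8:Nat) = 7+1 from rfl, show clearSeq [x0, x1, x2, x3, x4, x5] s (7+1) = clearSeq [0, x0, x1, x2, x3, x4] (s + 1) 7 from clearSeq_some _ _ _ _ _ f1 rfl]
      rw [show (7:Nat) = 6+1 from rfl, show clearSeq [0, x0, x1, x2, x3, x4] (s + 1) (6+1) = clearSeq [0, 0, x0, x1, x2, x4] ((s + 1) + 1) 6 from clearSeq_some _ _ _ _ _ f2 rfl]
      rw [show (6:Nat) = 5+1 from rfl, clearSeq_none _ _ _ f3]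
      simp [clearB, PySem.List.enumerate, h0, h1, h2, h3, h4, h5]
      try omega
    · simp_all [clearB, PySem.List.enumerate]
    · simp_all [clearB, PySem.List.enumerate]
    · simp_all [clearB, PySem.List.enumerate]
  · -- case
    have f1 : findFullB [x0, x1, x2, x3, x4, x5] (PySem.List.pyRange 5 1 (-1)) = some 3 := by simp [findFullB, hr, h0, h1, h2, h3, h4, h5]
    have f2 : findFullB [0, x0, x1, x2, x4, x5] (PySem.List.pyRange 5 1 (-1)) = none := by simp [findFullB, hr, h0, h1, h2, h3, h4, h5]
    refine ⟨?_, ?_, ?_, ?_⟩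
    · rw [show (8:Nat) = 7+1 from rfl, show clearSeq [x0, x1, x2, x3, x4, x5] s (7+1) = clearSeq [0, x0, x1, x2, x4, x5] (s + 1) 7 from clearSeq_some _ _ _ _ _ f1 rfl]
      rw [show (7:Nat) = 6+1 from rfl, clearSeq_none _ _ _ f2]
      simp [clearB, PySem.List.enumerate, h0, h1, h2, h3, h4, h5]
      try omega
    · simp_all [clearB, PySem.List.enumerate]
    · simp_all [clearB, PySem.List.enumerate]
    · simp_all [clearB, PySem.List.enumerate]
  · -- case
    have f1 : findFullB [x0, x1, x2, x3, x4, x5] (PySem.List.pyRange 5 1 (-1)) = some 5 := by simp [findFullB, hr, h0, h1, h2, h3, h4, h5]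
    have f2 : findFullB [0, x0, x1, x2, x3, x4] (PySem.List.pyRange 5 1 (-1)) = some 5 := by simp [findFullB, hr, h0, h1, h2, h3, h4, h5]
    have f3 : findFullB [0, 0, x0, x1, x2, x3] (PySem.List.pyRange 5 1 (-1)) = none := by simp [findFullB, hr, h0, h1, h2, h3, h4, h5]
    refine ⟨?_, ?_, ?_, ?_⟩
    · rw [show (8:Nat) = 7+1 from rfl, show clearSeq [x0, x1, x2, x3, x4, x5] s (7+1) = clearSeq [0, x0, x1, x2, x3, x4] (s + 1) 7 from clearSeq_some _ _ _ _ _ f1 rfl]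
      rw [show (7:Nat) = 6+1 from rfl, show clearSeq [0, x0, x1, x2, x3, x4] (s + 1) (6+1) = clearSeq [0, 0, x0, x1, x2, x3] ((s + 1) + 1) 6 from clearSeq_some _ _ _ _ _ f2 rfl]
      rw [show (6:Nat) = 5+1 from rfl, clearSeq_none _ _ _ f3]
      simp [clearB, PySem.List.enumerate, h0, h1, h2, h3, h4, h5]
      try omega
    · simp_all [clearB, PySem.List.enumerate]
    · simp_all [clearB, PySem.List.enumerate]
    · simp_all [clearB, PySem.List.enumerate]
  · -- case
    have f1 : findFullB [x0, x1, x2, x3, x4, x5] (PySem.List.pyRange 5 1 (-1)) = some 4 := by simp [findFullB, hr, h0, h1, h2, h3, h4, h5]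
    have f2 : findFullB [0, x0, x1, x2, x3, x5] (PySem.List.pyRange 5 1 (-1)) = none := by simp [findFullB, hr, h0, h1, h2, h3, h4, h5]
    refine ⟨?_, ?_, ?_, ?_⟩
    · rw [show (8:Nat) = 7+1 from rfl, show clearSeq [x0, x1, x2, x3, x4, x5] s (7+1) = clearSeq [0, x0, x1, x2, x3, x5] (s + 1) 7 from clearSeq_some _ _ _ _ _ f1 rfl]
      rw [show (7:Nat) = 6+1 from rfl, clearSeq_none _ _ _ f2]
      simp [clearB, PySem.List.enumerate, h0, h1, h2, h3, h4, h5]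
      try omega
    · simp_all [clearB, PySem.List.enumerate]
    · simp_all [clearB, PySem.List.enumerate]
    · simp_all [clearB, PySem.List.enumerate]
  · -- case
    have f1 : findFullB [x0, x1, x2, x3, x4, x5] (PySem.List.pyRange 5 1 (-1)) = some 5 := by simp [findFullB, hr, h0, h1, h2, h3, h4, h5]
    have f2 : findFullB [0, x0, x1, x2, x3, x4] (PySem.List.pyRange 5 1 (-1)) = none := by simp [findFullB, hr, h0, h1, h2, h3, h4, h5]
    refine ⟨?_, ?_, ?_, ?_⟩
    · rw [show (8:Nat) = 7+1 from rfl, show clearSeq [x0, x1, x2, x3, x4, x5] s (7+1) = clearSeq [0, x0, x1, x2, x3, x4] (s + 1) 7 from clearSeq_some _ _ _ _ _ f1 rfl]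
      rw [show (7:Nat) = 6+1 from rfl, clearSeq_none _ _ _ f2]
      simp [clearB, PySem.List.enumerate, h0, h1, h2, h3, h4, h5]
      try omega
    · simp_all [clearB, PySem.List.enumerate]
    · simp_all [clearB, PySem.List.enumerate]
    · simp_all [clearB, PySem.List.enumerate]
  · -- case
    have f1 : findFullB [x0, x1, x2, x3, x4, x5] (PySem.List.pyRange 5 1 (-1)) = none := by simp [findFullB, hr, h0, h1, h2, h3, h4, h5]
    refine ⟨?_, ?_, ?_, ?_⟩
    · rw [show (8:Nat) = 7+1 from rfl, clearSeq_none _ _ _ f1]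
      simp [clearB, PySem.List.enumerate, h0, h1, h2, h3, h4, h5]
      try omega
    · simp_all [clearB, PySem.List.enumerate]
    · simp_all [clearB, PySem.List.enumerate]
    · simp_all [clearB, PySem.List.enumerate]


-- check_filled against the bottom-up full-mask scan
theorem scan_corr (b : List (List Int)) (hb : VB b) :
    (checkFilledA b = some (b, 0) ∧
      findFullB (b.map rowMask) (PySem.List.pyRange 5 1 (-1)) = none) ∨
    (∃ k : Nat, 2 ≤ k ∧ k ≤ 5 ∧
      checkFilledA b = some (b.set k [0, 0, 0, 0], (k : Int)) ∧
      findFullB (b.map rowMask) (PySem.List.pyRange 5 1 (-1)) = some (k : Int)) := by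
  obtain ⟨r0, r1, r2, r3, r4, r5, hr0, hr1, hr2, hr3, hr4, hr5, rfl⟩ := hb
  have hrange : PySem.List.pyRange 5 1 (-1) = [5, 4, 3, 2] := by decide
  rw [checkFilledA, hrange]
  simp only [checkFilledGoA, findFullB, List.map,
    show PySem.List.pyGet? [r0,r1,r2,r3,r4,r5] (5:Int) = some r5 from rfl,
    show PySem.List.pyGet? [r0,r1,r2,r3,r4,r5] (4:Int) = some r4 from rfl,
    show PySem.List.pyGet? [r0,r1,r2,r3,r4,r5] (3:Int) = some r3 from rfl,
    show PySem.List.pyGet? [r0,r1,r2,r3,r4,r5] (2:Int) = some r2 from rfl,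
    rowAll_corr r5 hr5, rowAll_corr r4 hr4, rowAll_corr r3 hr3, rowAll_corr r2 hr2,
    Option.bind_some]
  by_cases h5 : rowMask r5 = 15
  · refine Or.inr ⟨5, by omega, by omega, ?_, ?_⟩ <;> (simp [h5]; try rfl)
  · by_cases h4 : rowMask r4 = 15
    · refine Or.inr ⟨4, by omega, by omega, ?_, ?_⟩ <;> (simp [h5, h4]; try rfl)
    · by_cases h3 : rowMask r3 = 15
      · refine Or.inr ⟨3, by omega, by omega, ?_, ?_⟩ <;> (simp [h5, h4, h3]; try rfl)
      · by_cases h2 : rowMask r2 = 15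
        · refine Or.inr ⟨2, by omega, by omega, ?_, ?_⟩ <;> (simp [h5, h4, h3, h2]; try rfl)
        · exact Or.inl ⟨by simp [h5, h4, h3, h2], by simp [h5, h4, h3, h2]⟩

theorem VB_cons_erase (b : List (List Int)) (hb : VB b) (k : Nat) (hk : k ≤ 5) :
    VB ([0, 0, 0, 0] :: b.eraseIdx k) := by
  obtain ⟨r0, r1, r2, r3, r4, r5, hr0, hr1, hr2, hr3, hr4, hr5, rfl⟩ := hb
  interval_cases k
  · exact ⟨_, r1, r2, r3, r4, r5, VRow_zero, hr1, hr2, hr3, hr4, hr5, rfl⟩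
  · exact ⟨_, r0, r2, r3, r4, r5, VRow_zero, hr0, hr2, hr3, hr4, hr5, rfl⟩
  · exact ⟨_, r0, r1, r3, r4, r5, VRow_zero, hr0, hr1, hr3, hr4, hr5, rfl⟩
  · exact ⟨_, r0, r1, r2, r4, r5, VRow_zero, hr0, hr1, hr2, hr4, hr5, rfl⟩
  · exact ⟨_, r0, r1, r2, r3, r5, VRow_zero, hr0, hr1, hr2, hr3, hr5, rfl⟩
  · exact ⟨_, r0, r1, r2, r3, r4, VRow_zero, hr0, hr1, hr2, hr3, hr4, rfl⟩

theorem mask_cons_erase (b : List (List Int)) (k : Nat) :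
    ([0, 0, 0, 0] :: b.eraseIdx k).map rowMask = 0 :: (b.map rowMask).eraseIdx k := by
  simp [← List.eraseIdx_map, show rowMask [0, 0, 0, 0] = 0 from rfl]

theorem delete_corr (b : List (List Int)) (hb : VB b) (k : Nat) (hk : k ≤ 5) :
    deleteRowA (b.set k [0, 0, 0, 0]) (k : Int) = some ([0, 0, 0, 0] :: b.eraseIdx k) := by
  rw [deleteRowA, PySem.List.pop?_natCast _ k
    (by rw [List.length_set, boards_len b hb]; omega)]
  simp [List.eraseIdx_set_eq]

-- A's one-row-per-pass clear loop stays in lockstep with its mask-level mirror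
theorem clear_corr : ∀ (fuel : Nat) (b : List (List Int)) (s : Int), VB b →
    ∃ b' s', clearLoopA b s fuel = some (b', s') ∧ VB b' ∧
      clearSeq (b.map rowMask) s fuel = (b'.map rowMask, s') := by
  intro fuel
  induction fuel with
  | zero => exact fun b s hb => ⟨b, s, rfl, hb, rfl⟩
  | succ n ih =>
    intro b s hb
    rw [clearLoopA, clearSeq]
    rcases scan_corr b hb with ⟨hA, hB⟩ | ⟨k, hk2, hk5, hA, hB⟩
    · exact ⟨b, s, by rw [hA, Option.bind_some, if_neg (by simp)], hb, by rw [hB]⟩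
    · obtain ⟨b', s', ihA, ihV, ihB⟩ := ih ([0, 0, 0, 0] :: b.eraseIdx k) (s + 1)
        (VB_cons_erase b hb k hk5)
      refine ⟨b', s', ?_, ihV, ?_⟩
      · rw [hA, Option.bind_some, if_pos (by simp; omega), delete_corr b hb k hk5,
          Option.bind_some, ihA]
      · rw [hB]
        simp only [Int.toNat_natCast]
        rw [← mask_cons_erase b k]
        exact ihB

-- one light-zone pass of A against its mask-level mirror
theorem light_corr (b : List (List Int)) (hb : VB b) :
    ∃ b', lightStepA b = some b' ∧ VB b' ∧ b'.map rowMask = lightMask (b.map rowMask) := by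
  obtain ⟨r0, r1, r2, r3, r4, r5, hr0, hr1, hr2, hr3, hr4, hr5, rfl⟩ := hb
  rw [lightStepA,
    show PySem.List.pyGet? [r0,r1,r2,r3,r4,r5] (1:Int) = some r1 from rfl,
    Option.bind_some, rowAny_corr r1 hr1, Option.bind_some]
  by_cases h1 : rowMask r1 = 0
  · refine ⟨_, by rw [if_neg (by simp [h1])], ⟨r0, r1, r2, r3, r4, r5, hr0, hr1, hr2, hr3,
      hr4, hr5, rfl⟩, ?_⟩
    simp [lightMask, h1]
  · refine ⟨_, by rw [if_pos (by simp [h1]),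
        show deleteRowA [r0,r1,r2,r3,r4,r5] (5:Int) = some [[0,0,0,0],r0,r1,r2,r3,r4] from rfl],
      ⟨_, r0, r1, r2, r3, r4, VRow_zero, hr0, hr1, hr2, hr3, hr4, rfl⟩, ?_⟩
    simp [lightMask, h1, show rowMask [0,0,0,0] = 0 from rfl]

-- one whole turn: A's play against B's staged closed-form play, with the invariant
-- that the two light-zone rows are empty before and after
theorem play_corr (b : List (List Int)) (hb : VB b)
    (hm0 : (b.map rowMask).getD 0 0 = 0) (hm1 : (b.map rowMask).getD 1 0 = 0)
    (t : Int) (dr dc col : Nat)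
    (ht : blockOffsetsA t = some ((dr : Int), (dc : Int)))
    (hdr : dr ≤ 1) (hcd : col + dc ≤ 3) :
    ∃ b' s, playA b t (col : Int) = some (b', s) ∧ VB b' ∧
      playB (b.map rowMask) dr dc col = (b'.map rowMask, s) ∧
      (b'.map rowMask).getD 0 0 = 0 ∧ (b'.map rowMask).getD 1 0 = 0 := by
  have hlen6 : (b.map rowMask).length = 6 := by simp [boards_len b hb]
  obtain ⟨h11, h16, h1e, h1o⟩ := topB_spec1 (b.map rowMask) col
  obtain ⟨h21, h26, h2e, h2o⟩ := topB_specD (b.map rowMask) (col + dc) dr hdr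
  set T1 := topB (b.map rowMask) col (PySem.List.pyRange 1 6 1) with hT1def
  set T2 := topB (b.map rowMask) (col + dc) (PySem.List.pyRange ((1 + dr : Nat) : Int) 6 1) with hT2def
  set R := min (5 - dr) (min (T1 - 1) (T2 - 1 - dr)) with hRdef
  have hRB : dropRowB (b.map rowMask) dr dc col = R := by
    rw [hRdef, hT1def, hT2def]; rfl
  have hR5 : R + dr ≤ 5 := by
    have := min_le_left (5 - dr) (min (T1 - 1) (T2 - 1 - dr)); omega
  have hloop := addLoop_min b hb dr dc col T1 T2 hdr hcd h11 h16 h1e h1o h21 h26 h2e h2o 6 0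
    (by omega) (by have := min_le_left (5 - dr) (min (T1 - 1) (T2 - 1 - dr)); omega)
  obtain ⟨b1, hA1, hV1, hM1⟩ := addBlock_corr b hb t dr dc col R ht hdr hcd hR5 hloop
  have hR1 : dr = 0 → 1 ≤ R := by
    intro h0dr
    have hT1g : 2 ≤ T1 := by
      rcases Nat.lt_or_ge T1 2 with hlt | hge
      · exfalso
        refine h1o (by omega) ?_
        rw [show T1 = 1 by omega, hm1]
        simp
      · exact hge
    have hT2g : 2 ≤ T2 := by
      rcases Nat.lt_or_ge T2 2 with hlt | hge
      · exfalso
        refine h2o (by omega) ?_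
        rw [show T2 = 1 by omega, hm1]
        simp
      · exact hge
    rw [hRdef]
    exact le_min (by omega) (le_min (by omega) (by omega))
  have hpost := postadd_facts (b.map rowMask) hlen6 hm0 hm1 R dr dc col hdr (by omega) hcd hR5 hR1
  rw [← hM1] at hpost
  obtain ⟨b2, s, hA2, hV2, hB2⟩ := clear_corr 8 b1 0 hV1
  have hlen1 : (b1.map rowMask).length = 6 := by simp [boards_len b1 hV1]
  obtain ⟨hseq, hc0, hc1, hcimp⟩ := seq_batch (b1.map rowMask) hlen1 0 hpost.1 hpost.2.1 hpost.2.2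
  rw [hB2, Prod.ext_iff] at hseq
  have hb2m : b2.map rowMask = (clearB (b1.map rowMask)).1 := hseq.1
  have hs : s = 0 + (clearB (b1.map rowMask)).2 := hseq.2
  obtain ⟨b3, hA3, hV3, hM3⟩ := light_corr b2 hV2
  obtain ⟨b4, hA4, hV4, hM4⟩ := light_corr b3 hV3
  obtain ⟨u0, u1, u2, u3, u4, u5, hu0, hu1, hu2, hu3, hu4, hu5, hbeq⟩ := hV2
  have hml : b2.map rowMask =
      [rowMask u0, rowMask u1, rowMask u2, rowMask u3, rowMask u4, rowMask u5] := by
    rw [hbeq]; rfl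
  have hb4 : b4.map rowMask = lightB (b2.map rowMask) := by
    rw [hM4, hM3, hml]
    exact light2_closed _ _ _ _ _ _
  have himp2 : (b2.map rowMask).getD 0 0 ≠ 0 → (b2.map rowMask).getD 1 0 ≠ 0 := by
    rw [hb2m]; exact hcimp
  have hzero : (lightB (b2.map rowMask)).getD 0 0 = 0 ∧
      (lightB (b2.map rowMask)).getD 1 0 = 0 := by
    rw [hml] at himp2 ⊢
    exact light_post _ _ _ _ _ _ (by simpa using himp2)
  refine ⟨b4, s, ?_, hV4, ?_, ?_, ?_⟩
  · rw [playA, hA1, Option.bind_some, hA2, Option.bind_some, hA3, Option.bind_some, hA4,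
      Option.map_some]
  · show playB (b.map rowMask) dr dc col = (b4.map rowMask, s)
    simp only [playB]
    rw [hRB, ← hM1, ← hb2m, hb4]
    refine Prod.ext rfl ?_
    show (clearB (b1.map rowMask)).2 = s
    rw [hs, zero_add]
  · rw [hb4]; exact hzero.1
  · rw [hb4]; exact hzero.2

theorem VB_init : VB initBoardA :=
  ⟨_, _, _, _, _, _, VRow_zero, VRow_zero, VRow_zero, VRow_zero, VRow_zero, VRow_zero, rfl⟩

theorem count_corr (g bl : List (List Int)) (hg : VB g) (hb : VB bl) :
    countA (g ++ bl) = countB (g.map rowMask ++ bl.map rowMask) := by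
  obtain ⟨r0, r1, r2, r3, r4, r5, hr0, hr1, hr2, hr3, hr4, hr5, rfl⟩ := hg
  obtain ⟨u0, u1, u2, u3, u4, u5, hu0, hu1, hu2, hu3, hu4, hu5, rfl⟩ := hb
  simp only [countA, countB, List.cons_append, List.nil_append, List.flatMap_cons,
    List.flatMap_nil, List.map_append, List.sum_append, List.map_cons, List.map_nil,
    List.sum_nil,
    row_count r0 hr0, row_count r1 hr1, row_count r2 hr2, row_count r3 hr3,
    row_count r4 hr4, row_count r5 hr5,
    row_count u0 hu0, row_count u1 hu1, row_count u2 hu2, row_count u3 hu3,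
    row_count u4 hu4, row_count u5 hu5]
  simp

-- the whole game loop, threading board validity and the empty-light-zone invariant
theorem fold_corr : ∀ (blocks : List (Int × Int × Int)) (g bl : List (List Int)) (s : Int),
    Pre_solve blocks → VB g → VB bl →
    (g.map rowMask).getD 0 0 = 0 → (g.map rowMask).getD 1 0 = 0 →
    (bl.map rowMask).getD 0 0 = 0 → (bl.map rowMask).getD 1 0 = 0 →
    ∃ g' bl' s', blocks.foldl stepA (some (g, bl, s)) = some (g', bl', s') ∧ VB g' ∧ VB bl' ∧
      blocks.foldl stepB (g.map rowMask, bl.map rowMask, s) =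
        (g'.map rowMask, bl'.map rowMask, s') := by
  intro blocks
  induction blocks with
  | nil => exact fun g bl s _ hg hb _ _ _ _ => ⟨g, bl, s, rfl, hg, hb, rfl⟩
  | cons blk rest ihr =>
    intro g bl s hpre hg hb hg0 hg1 hb0 hb1
    obtain ⟨t, x, y⟩ := blk
    have hpre1 := hpre (t, x, y) (List.mem_cons_self ..)
    dsimp only at hpre1
    have hprer : Pre_solve rest := fun b hbm => hpre b (List.mem_cons_of_mem _ hbm)
    rw [List.foldl_cons, List.foldl_cons]
    by_cases ht1 : t = 1
    · subst ht1
      obtain ⟨hx0, hx3, hy0, hy3⟩ := hpre1.1 rfl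
      obtain ⟨g', s1, hgA, hgV, hgB, hg0', hg1'⟩ :=
        play_corr g hg hg0 hg1 1 0 0 y.toNat rfl (by omega) (by omega)
      obtain ⟨bl', s2, hbA, hbV, hbB, hb0', hb1'⟩ :=
        play_corr bl hb hb0 hb1 1 0 0 x.toNat rfl (by omega) (by omega)
      rw [show (stepA (some (g, bl, s)) (1, x, y)) = some (g', bl', s + s1 + s2) by
            simp only [stepA, Option.bind_some]
            rw [show y = ((y.toNat : Nat) : Int) from (Int.toNat_of_nonneg hy0).symm,
              show x = ((x.toNat : Nat) : Int) from (Int.toNat_of_nonneg hx0).symm, hgA, hbA]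
            rfl,
          show (stepB (g.map rowMask, bl.map rowMask, s) (1, x, y)) =
              (g'.map rowMask, bl'.map rowMask, s + s1 + s2) by
            simp only [stepB]
            rw [hgB, hbB]
            exact if_pos trivial]
      exact ihr g' bl' (s + s1 + s2) hprer hgV hbV hg0' hg1' hb0' hb1'
    · by_cases ht2 : t = 2
      · subst ht2
        obtain ⟨hx0, hx3, hy0, hy2⟩ := hpre1.2.1 rfl
        obtain ⟨g', s1, hgA, hgV, hgB, hg0', hg1'⟩ :=
          play_corr g hg hg0 hg1 2 0 1 y.toNat rfl (by omega) (by omega)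
        obtain ⟨bl', s2, hbA, hbV, hbB, hb0', hb1'⟩ :=
          play_corr bl hb hb0 hb1 3 1 0 x.toNat rfl (by omega) (by omega)
        rw [show (stepA (some (g, bl, s)) (2, x, y)) = some (g', bl', s + s1 + s2) by
              simp only [stepA, Option.bind_some]
              norm_num
              rw [show y = ((y.toNat : Nat) : Int) from (Int.toNat_of_nonneg hy0).symm,
                show x = ((x.toNat : Nat) : Int) from (Int.toNat_of_nonneg hx0).symm, hgA, hbA]
              rfl,
            show (stepB (g.map rowMask, bl.map rowMask, s) (2, x, y)) =
                (g'.map rowMask, bl'.map rowMask, s + s1 + s2) by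
              simp only [stepB]
              norm_num
              rw [hgB, hbB]
              exact ⟨rfl, rfl, rfl⟩]
        exact ihr g' bl' (s + s1 + s2) hprer hgV hbV hg0' hg1' hb0' hb1'
      · by_cases ht3 : t = 3
        · subst ht3
          obtain ⟨hx0, hx2, hy0, hy3⟩ := hpre1.2.2 rfl
          obtain ⟨g', s1, hgA, hgV, hgB, hg0', hg1'⟩ :=
            play_corr g hg hg0 hg1 3 1 0 y.toNat rfl (by omega) (by omega)
          obtain ⟨bl', s2, hbA, hbV, hbB, hb0', hb1'⟩ :=
            play_corr bl hb hb0 hb1 2 0 1 x.toNat rfl (by omega) (by omega)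
          rw [show (stepA (some (g, bl, s)) (3, x, y)) = some (g', bl', s + s1 + s2) by
                simp only [stepA, Option.bind_some]
                norm_num
                rw [show y = ((y.toNat : Nat) : Int) from (Int.toNat_of_nonneg hy0).symm,
                  show x = ((x.toNat : Nat) : Int) from (Int.toNat_of_nonneg hx0).symm, hgA, hbA]
                rfl,
              show (stepB (g.map rowMask, bl.map rowMask, s) (3, x, y)) =
                  (g'.map rowMask, bl'.map rowMask, s + s1 + s2) by
                simp only [stepB]
                norm_num
                rw [hgB, hbB]
                exact ⟨rfl, rfl, rfl⟩]
          exact ihr g' bl' (s + s1 + s2) hprer hgV hbV hg0' hg1' hb0' hb1'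
        · rw [show (stepA (some (g, bl, s)) (t, x, y)) = some (g, bl, s) by
                simp [stepA, ht1, ht2, ht3],
              show (stepB (g.map rowMask, bl.map rowMask, s) (t, x, y)) =
                  (g.map rowMask, bl.map rowMask, s) by simp [stepB, ht1, ht2, ht3]]
          exact ihr g bl s hprer hg hb hg0 hg1 hb0 hb1

-- ===== VERDICT (by name: the statement is the Claim_ definition above) =====
theorem solve_spec : Claim_equal_solve := by
  intro blocks _ hpre
  show solve blocks = solve_alt blocks
  obtain ⟨g', bl', s', hA, hgV, hbV, hB⟩ :=
    fold_corr blocks initBoardA initBoardA 0 hpre VB_init VB_init rfl rfl rfl rfl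
  rw [solve, solve_alt, hA,
    show ([0,0,0,0,0,0] : List Nat) = initBoardA.map rowMask from rfl, hB]
  show (s', countA (g' ++ bl')) = (s', countB (g'.map rowMask ++ bl'.map rowMask))
  exact Prod.ext rfl (count_corr g' bl' hgV hbV)
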